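-- pv_equiv track=rewrite | github.com/WilliamLP/AdventOfCode | 2021/day22.py | coord_range
-- ===== SOURCE A (Python) =====
-- def coord_range(volumes, key1, key2):
--     coord_set = set()
--     for v in volumes:
--         coord_set.add(v[key1])
--         coord_set.add(v[key2])
--
--     res = []
--     prev = None
--     for coord in sorted(list(coord_set)):
--         if prev is None:
--             res.append((coord, coord))
--         else:
--             if coord - prev > 1:
--                 # Interior region
--                 res.append((prev+1, coord-1))
--             res.append((coord, coord))
--         prev = coord
--     return res
-- ===== SOURCE B (Python) =====
-- def _split(ivs, c):
--     # c is known to lie inside one of the intervals; rebuild around it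
--     (lo, hi), rest = ivs[0], ivs[1:]
--     if hi < c:
--         return [(lo, hi)] + _split(rest, c)
--     if lo == hi:
--         return ivs  # c coincides with an existing single-cell interval
--     left = [(lo, c - 1)] if lo < c else []
--     right = [(c + 1, hi)] if c < hi else []
--     return left + [(c, c)] + right + rest
--
--
-- def _insert(ivs, c):
--     # insert coordinate c into the sorted disjoint interval partition ivs
--     if not ivs:
--         return [(c, c)]
--     if c < ivs[0][0]:
--         gap = [(c + 1, ivs[0][0] - 1)] if ivs[0][0] - c > 1 else []
--         return [(c, c)] + gap + ivs
--     if c > ivs[-1][1]: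
--         gap = [(ivs[-1][1] + 1, c - 1)] if c - ivs[-1][1] > 1 else []
--         return ivs + gap + [(c, c)]
--     return _split(ivs, c)
--
--
-- def coord_range(volumes, key1, key2):
--     ivs = []
--     for v in volumes:
--         ivs = _insert(ivs, v[key1])
--         ivs = _insert(ivs, v[key2])
--     return ivs
-- ===== Notes on version B (the rewrite author's own statement) =====
-- stated objective: alternative
-- what changed: A collects all coordinates into a set, sorts them once, then emits point and gap intervals in one stateful sweep; B never sorts: it maintains the sorted disjoint interval partition itself and inserts each coordinate as it is read, splitting the interval it lands in (or prepending/appending a new point and gap) in place.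
import Mathlib
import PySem

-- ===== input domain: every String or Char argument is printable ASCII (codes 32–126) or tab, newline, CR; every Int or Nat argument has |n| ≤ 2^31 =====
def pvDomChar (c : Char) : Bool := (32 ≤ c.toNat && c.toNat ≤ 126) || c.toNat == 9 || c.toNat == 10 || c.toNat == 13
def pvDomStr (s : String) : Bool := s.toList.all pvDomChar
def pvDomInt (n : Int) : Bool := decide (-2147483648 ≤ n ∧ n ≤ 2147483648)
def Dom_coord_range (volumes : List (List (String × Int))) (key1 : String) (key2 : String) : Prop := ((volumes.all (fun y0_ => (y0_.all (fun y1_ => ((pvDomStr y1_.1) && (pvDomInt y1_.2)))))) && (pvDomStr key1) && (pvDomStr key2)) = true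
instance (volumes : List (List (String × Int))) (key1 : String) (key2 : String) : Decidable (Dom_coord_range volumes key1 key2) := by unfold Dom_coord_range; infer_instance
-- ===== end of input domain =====

-- B replaces A's sort-then-scan (collect all coords in a set, sort, one stateful gap-emitting
-- sweep) by an incremental algorithm: it maintains the sorted disjoint interval partition itself
-- and inserts each coordinate as it is read, splitting or extending intervals in place
-- (objective: alternative). Return-value equivalence only; neither program mutates its arguments.

-- ===== PORT A =====
-- the body of A's 'for coord in sorted(...)' loop, state = (res, prev)
def pvStepA (st : List (Int × Int) × Option Int) (coord : Int) : List (Int × Int) × Option Int :=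
  match st.2 with
  | none => (st.1 ++ [(coord, coord)], some coord)
  | some prev =>
      ((if coord - prev > 1 then st.1 ++ [(prev + 1, coord - 1)] else st.1) ++ [(coord, coord)],
       some coord)

def coord_range (volumes : List (List (String × Int))) (key1 : String) (key2 : String) :
    List (Int × Int) :=
  -- v[key] is ported as getD with a dummy default; Pre_ guarantees both keys are present
  -- (Python raises KeyError otherwise)
  let coordSet : PySem.Set Int := volumes.foldl
    (fun s v => PySem.Set.add (PySem.Set.add s ((PySem.Dict.mk v).getD key1 0))
      ((PySem.Dict.mk v).getD key2 0))
    PySem.Set.empty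
  ((PySem.List.sorted coordSet (fun c => c)).foldl pvStepA
    (([] : List (Int × Int)), (none : Option Int))).1

-- ===== PORT B =====
-- B's _split(ivs, c): c lies inside one of the intervals; rebuild around it.
-- (Python's _split raises IndexError on [], which _insert never passes; the port returns [] there.)
def pvSplit (ivs : List (Int × Int)) (c : Int) : List (Int × Int) :=
  match ivs with
  | [] => []
  | (lo, hi) :: rest =>
    if hi < c then (lo, hi) :: pvSplit rest c
    else if lo == hi then (lo, hi) :: rest
    else (if lo < c then [(lo, c - 1)] else []) ++ [(c, c)] ++
         (if c < hi then [(c + 1, hi)] else []) ++ rest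

-- B's _insert(ivs, c); ivs[-1] is ported with PySem's negative indexing (list is nonempty there)
def pvInsert (ivs : List (Int × Int)) (c : Int) : List (Int × Int) :=
  match ivs with
  | [] => [(c, c)]
  | iv0 :: rest =>
    if c < iv0.1 then
      (c, c) :: ((if iv0.1 - c > 1 then [(c + 1, iv0.1 - 1)] else []) ++ iv0 :: rest)
    else
      let lastv := PySem.List.pyGetD (iv0 :: rest) (-1) (0, 0)
      if c > lastv.2 then
        (iv0 :: rest) ++ ((if c - lastv.2 > 1 then [(lastv.2 + 1, c - 1)] else []) ++ [(c, c)])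
      else pvSplit (iv0 :: rest) c

def coord_range_alt (volumes : List (List (String × Int))) (key1 : String) (key2 : String) :
    List (Int × Int) :=
  volumes.foldl
    (fun ivs v =>
      pvInsert (pvInsert ivs ((PySem.Dict.mk v).getD key1 0)) ((PySem.Dict.mk v).getD key2 0))
    []

-- ===== PRECONDITION & SPEC =====
-- Pre_ excludes exactly the inputs where Python A raises KeyError: some volume lacks key1 or key2.
def Pre_coord_range (volumes : List (List (String × Int))) (key1 : String) (key2 : String) : Prop :=
  (volumes.all (fun v => (PySem.Dict.mk v).contains key1 && (PySem.Dict.mk v).contains key2)) = true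

instance (volumes : List (List (String × Int))) (key1 : String) (key2 : String) :
    Decidable (Pre_coord_range volumes key1 key2) := by unfold Pre_coord_range; infer_instance

def pvWitness_coord_range : (List (List (String × Int))) × String × String :=
  ([[("a", 1), ("b", 5)], [("a", -2), ("b", 1)]], "a", "b")

def Spec_coord_range (volumes : List (List (String × Int))) (key1 : String) (key2 : String)
    (out : List (Int × Int)) : Prop := out = coord_range_alt volumes key1 key2

instance (volumes : List (List (String × Int))) (key1 : String) (key2 : String)
    (out : List (Int × Int)) : Decidable (Spec_coord_range volumes key1 key2 out) := by
  unfold Spec_coord_range; infer_instance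

-- ===== CLAIM (what is proved, stated in full; the proofs are below) =====
def Claim_equal_coord_range : Prop := ∀ (volumes : List (List (String × Int))) (key1 : String) (key2 : String), Dom_coord_range volumes key1 key2 → Pre_coord_range volumes key1 key2 → Spec_coord_range volumes key1 key2 (coord_range volumes key1 key2)

-- ===== LEMMAS AND PROOFS =====

-- the canonical answer for a strictly increasing coordinate list
def pvGapF (q : Int × Int) : Option (Int × Int) :=
  if q.2 - q.1 > 1 then some (q.1 + 1, q.2 - 1) else none

def pvChain : Int → List Int → List (Int × Int)
  | _, [] => []
  | p, c :: cs => (pvGapF (p, c)).toList ++ [(c, c)] ++ pvChain c cs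

def pvChainAll : List Int → List (Int × Int)
  | [] => []
  | c :: cs => (c, c) :: pvChain c cs

-- insertion into a strictly increasing list (proof-side model of B's state change)
def insSorted : List Int → Int → List Int
  | [], c => [c]
  | x :: xs, c => if c < x then c :: x :: xs else if c = x then x :: xs else x :: insSorted xs c

-- ---- A side: the fold over the sorted coordinates is pvChainAll ----

lemma pvFoldl_add_pair (volumes : List (List (String × Int))) (key1 key2 : String)
    (s : PySem.Set Int) :
    volumes.foldl
      (fun s v => PySem.Set.add (PySem.Set.add s ((PySem.Dict.mk v).getD key1 0))
        ((PySem.Dict.mk v).getD key2 0)) s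
    = (volumes.flatMap
        (fun v => [(PySem.Dict.mk v).getD key1 0, (PySem.Dict.mk v).getD key2 0])).foldl
        PySem.Set.add s := by
  induction volumes generalizing s with
  | nil => rfl
  | cons v vs ih => simp [List.flatMap_cons, ih, List.foldl]

lemma pvCoordSet_eq (volumes : List (List (String × Int))) (key1 key2 : String) :
    volumes.foldl
      (fun s v => PySem.Set.add (PySem.Set.add s ((PySem.Dict.mk v).getD key1 0))
        ((PySem.Dict.mk v).getD key2 0)) PySem.Set.empty
    = PySem.Set.ofList (volumes.flatMap
        (fun v => [(PySem.Dict.mk v).getD key1 0, (PySem.Dict.mk v).getD key2 0])) := by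
  rw [pvFoldl_add_pair, PySem.Set.ofList_eq_foldl]
  rfl

lemma pvFold_chain (cs : List Int) : ∀ (res : List (Int × Int)) (p : Int),
    (cs.foldl pvStepA (res, some p)).1 = res ++ pvChain p cs := by
  induction cs with
  | nil => intro res p; simp [pvChain]
  | cons c cs ih =>
    intro res p
    have hstep : pvStepA (res, some p) c
        = (res ++ ((pvGapF (p, c)).toList ++ [(c, c)]), some c) := by
      simp only [pvStepA, pvGapF]
      split_ifs with h <;> simp
    simp only [List.foldl_cons, hstep, ih, pvChain]
    simp

lemma pvA_chain (L : List Int) :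
    (L.foldl pvStepA (([] : List (Int × Int)), (none : Option Int))).1 = pvChainAll L := by
  cases L with
  | nil => rfl
  | cons c cs =>
    have h0 : pvStepA ([], none) c = ([(c, c)], some c) := rfl
    simp only [List.foldl_cons, h0, pvFold_chain, pvChainAll]
    rfl

-- ---- B side: pvInsert on pvChainAll s is pvChainAll (insSorted s c) ----

lemma mem_insSorted (s : List Int) (c a : Int) :
    a ∈ insSorted s c ↔ a = c ∨ a ∈ s := by
  induction s with
  | nil => simp [insSorted]
  | cons x xs ih =>
    simp only [insSorted]
    split_ifs with h1 h2
    · simp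
    · subst h2; simp
    · simp [ih]; tauto

lemma pairwise_insSorted (s : List Int) (c : Int) (h : s.Pairwise (· < ·)) :
    (insSorted s c).Pairwise (· < ·) := by
  induction s with
  | nil => simp [insSorted]
  | cons x xs ih =>
    rcases List.pairwise_cons.mp h with ⟨hx, hxs⟩
    simp only [insSorted]
    split_ifs with h1 h2
    · refine List.pairwise_cons.mpr ⟨?_, h⟩
      intro b hb
      rcases List.mem_cons.mp hb with rfl | hb
      · exact h1
      · exact lt_trans h1 (hx b hb)
    · exact h
    · refine List.pairwise_cons.mpr ⟨?_, ih hxs⟩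
      intro b hb
      rcases (mem_insSorted xs c b).mp hb with rfl | hb
      · omega
      · exact hx b hb

lemma chain_getLast? (xs : List Int) : ∀ (p : Int),
    ((p, p) :: pvChain p xs).getLast? = some (xs.getLastD p, xs.getLastD p) := by
  induction xs with
  | nil => intro p; simp [pvChain]
  | cons b ys ih =>
    intro p
    have : (p, p) :: pvChain p (b :: ys)
        = ((p, p) :: (pvGapF (p, b)).toList) ++ ((b, b) :: pvChain b ys) := by
      simp [pvChain]
    rw [this, List.getLast?_append, ih b]
    cases ys <;> simp [List.getLastD]

lemma le_getLastD (xs : List Int) : ∀ (p a : Int),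
    (p :: xs).Pairwise (· < ·) → a ∈ p :: xs → a ≤ xs.getLastD p := by
  induction xs with
  | nil => intro p a _ ha; simp at ha; simp [ha]
  | cons b ys ih =>
    intro p a hpw ha
    rcases List.pairwise_cons.mp hpw with ⟨hp, hbw⟩
    rw [List.getLastD_cons]
    rcases List.mem_cons.mp ha with rfl | ha
    · have hb : b ≤ ys.getLastD b := ih b b hbw (by simp)
      have : a < b := hp b (by simp)
      omega
    · exact ih b a hbw ha

lemma chain_append (xs : List Int) : ∀ (p c : Int),
    pvChain p (xs ++ [c])
    = pvChain p xs ++ (pvGapF (xs.getLastD p, c)).toList ++ [(c, c)] := by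
  induction xs with
  | nil => intro p c; simp [pvChain]
  | cons b ys ih =>
    intro p c
    simp only [List.cons_append, pvChain, ih b c, List.getLastD_cons]
    simp

lemma insSorted_gt (s : List Int) (c : Int) (h : ∀ a ∈ s, a < c) :
    insSorted s c = s ++ [c] := by
  induction s with
  | nil => rfl
  | cons x xs ih =>
    have hx : x < c := h x (by simp)
    simp only [insSorted, if_neg (by omega : ¬ c < x), if_neg (by omega : ¬ c = x),
      List.cons_append]
    rw [ih (fun a ha => h a (by simp [ha]))]

lemma split_chain (xs : List Int) : ∀ (p c : Int),
    (p :: xs).Pairwise (· < ·) → p < c → c ≤ xs.getLastD p →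
    pvSplit (pvChain p xs) c = pvChain p (insSorted xs c) := by
  induction xs with
  | nil => intro p c _ h1 h2; simp at h2; omega
  | cons b ys ih =>
    intro p c hpw h1 h2
    rcases List.pairwise_cons.mp hpw with ⟨hp, hbw⟩
    have hpb : p < b := hp b (by simp)
    rw [List.getLastD_cons] at h2
    rcases lt_trichotomy c b with hcb | hcb | hcb
    · -- c < b: c lies strictly between p and b, so the gap interval is nonempty and is split
      have hg : b - p > 1 := by omega
      have hchain : pvChain p (b :: ys) = (p + 1, b - 1) :: (b, b) :: pvChain b ys := by
        simp [pvChain, pvGapF, hg]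
      have hins : insSorted (b :: ys) c = c :: b :: ys := by
        simp only [insSorted]; rw [if_pos hcb]
      rw [hchain, hins]
      have hrhs : pvChain p (c :: b :: ys)
          = (pvGapF (p, c)).toList ++ (c, c) :: ((pvGapF (c, b)).toList ++ (b, b) :: pvChain b ys) := by
        simp [pvChain]
      rw [hrhs]
      simp only [pvSplit]
      rw [if_neg (show ¬ (b - 1 < c) by omega)]
      by_cases hsg : p + 1 = b - 1
      · -- single-cell gap: c coincides with it, nothing changes
        have hc : c = p + 1 := by omega
        rw [if_pos (show ((p + 1 : Int) == (b - 1)) = true by simp [hsg])]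
        simp [pvGapF, show ¬ (c - p > 1) by omega, show ¬ (b - c > 1) by omega, Prod.ext_iff]
        omega
      · -- proper split of the gap interval
        rw [if_neg (show ¬ ((p + 1 : Int) == (b - 1)) = true by simp; omega)]
        simp only [pvGapF]
        split_ifs <;> (try simp) <;> omega
    · -- c = b: already a coordinate, nothing changes
      subst hcb
      have hins : insSorted (c :: ys) c = c :: ys := by
        simp [insSorted]
      rw [hins]
      by_cases hg : c - p > 1
      · have hchain : pvChain p (c :: ys) = (p + 1, c - 1) :: (c, c) :: pvChain c ys := by
          simp [pvChain, pvGapF, hg]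
        rw [hchain]
        simp only [pvSplit]
        rw [if_pos (show c - 1 < c by omega), if_neg (show ¬ (c < c) by omega),
          if_pos (show ((c : Int) == c) = true by simp)]
      · have hchain : pvChain p (c :: ys) = (c, c) :: pvChain c ys := by
          simp [pvChain, pvGapF, hg]
        rw [hchain]
        simp only [pvSplit]
        rw [if_neg (show ¬ (c < c) by omega), if_pos (show ((c : Int) == c) = true by simp)]
    · -- b < c: skip past b's point (and the gap before it) and recurse
      have hins : insSorted (b :: ys) c = b :: insSorted ys c := by
        simp only [insSorted]; rw [if_neg (by omega), if_neg (by omega)]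
      rw [hins]
      have ihb := ih b c hbw hcb h2
      by_cases hg : b - p > 1
      · have hchain : pvChain p (b :: ys) = (p + 1, b - 1) :: (b, b) :: pvChain b ys := by
          simp [pvChain, pvGapF, hg]
        have hrhs : pvChain p (b :: insSorted ys c)
            = (p + 1, b - 1) :: (b, b) :: pvChain b (insSorted ys c) := by
          simp [pvChain, pvGapF, hg]
        rw [hchain, hrhs]
        simp only [pvSplit]
        rw [if_pos (show b - 1 < c by omega), if_pos (show b < c by omega), ihb]
      · have hchain : pvChain p (b :: ys) = (b, b) :: pvChain b ys := by
          simp [pvChain, pvGapF, hg]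
        have hrhs : pvChain p (b :: insSorted ys c) = (b, b) :: pvChain b (insSorted ys c) := by
          simp [pvChain, pvGapF, hg]
        rw [hchain, hrhs]
        simp only [pvSplit]
        rw [if_pos (show b < c by omega), ihb]

lemma insert_chainAll (s : List Int) (c : Int) (h : s.Pairwise (· < ·)) :
    pvInsert (pvChainAll s) c = pvChainAll (insSorted s c) := by
  cases s with
  | nil => rfl
  | cons x xs =>
    rcases List.pairwise_cons.mp h with ⟨hx, hxs⟩
    simp only [pvChainAll, pvInsert]
    by_cases h1 : c < x
    · rw [if_pos h1]
      have hins : insSorted (x :: xs) c = c :: x :: xs := by simp [insSorted, h1]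
      rw [hins]
      simp only [pvChain, pvGapF]
      split_ifs with h2 <;> simp_all
    · rw [if_neg h1]
      -- ivs[-1] is the point interval of the maximum coordinate
      have hlastq : ((x, x) :: pvChain x xs).getLast? = some (xs.getLastD x, xs.getLastD x) :=
        chain_getLast? xs x
      have hlast : PySem.List.pyGetD ((x, x) :: pvChain x xs) (-1) (0, 0)
          = (xs.getLastD x, xs.getLastD x) := by
        rw [PySem.List.pyGetD_neg_one ((x, x) :: pvChain x xs) (0, 0) (by simp)]
        rw [List.getLast_eq_iff_getLast?_eq_some]
        exact hlastq
      rw [hlast]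
      by_cases h2 : c > xs.getLastD x
      · rw [if_pos h2]
        have hall : ∀ a ∈ x :: xs, a < c := by
          intro a ha
          have := le_getLastD xs x a h ha
          omega
        rw [insSorted_gt (x :: xs) c hall]
        have : (x :: xs) ++ [c] = x :: (xs ++ [c]) := by simp
        rw [this]
        simp only [chain_append, pvGapF]
        split_ifs with h3 <;> simp_all
      · rw [if_neg h2]
        by_cases h3 : c = x
        · subst h3
          simp only [pvSplit]
          rw [if_neg (by omega : ¬ c < c), if_pos (by simp)]
          have hins : insSorted (c :: xs) c = c :: xs := by simp [insSorted]
          rw [hins]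
        · have hxc : x < c := by omega
          simp only [pvSplit]
          rw [if_pos hxc]
          have hins : insSorted (x :: xs) c = x :: insSorted xs c := by
            simp [insSorted, (by omega : ¬ c < x), h3]
          rw [hins]
          rw [split_chain xs x c h hxc (by omega)]

-- ---- folding the insertions ----

lemma fold_mem_insSorted (l : List Int) : ∀ (s : List Int) (a : Int),
    a ∈ l.foldl insSorted s ↔ a ∈ s ∨ a ∈ l := by
  induction l with
  | nil => simp
  | cons x xs ih =>
    intro s a
    simp only [List.foldl_cons, ih, mem_insSorted]
    simp
    tauto

lemma fold_pairwise_insSorted (l : List Int) : ∀ (s : List Int), s.Pairwise (· < ·) →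
    (l.foldl insSorted s).Pairwise (· < ·) := by
  induction l with
  | nil => intro s h; exact h
  | cons x xs ih => intro s h; exact ih _ (pairwise_insSorted s x h)

lemma fold_insert_chain (l : List Int) : ∀ (s : List Int), s.Pairwise (· < ·) →
    l.foldl pvInsert (pvChainAll s) = pvChainAll (l.foldl insSorted s) := by
  induction l with
  | nil => intro s _; rfl
  | cons x xs ih =>
    intro s h
    simp only [List.foldl_cons, insert_chainAll s x h]
    exact ih _ (pairwise_insSorted s x h)

lemma pvAltFold (volumes : List (List (String × Int))) (key1 key2 : String) :
    ∀ (st : List (Int × Int)),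
    volumes.foldl
      (fun ivs v =>
        pvInsert (pvInsert ivs ((PySem.Dict.mk v).getD key1 0)) ((PySem.Dict.mk v).getD key2 0))
      st
    = (volumes.flatMap
        (fun v => [(PySem.Dict.mk v).getD key1 0, (PySem.Dict.mk v).getD key2 0])).foldl
        pvInsert st := by
  induction volumes with
  | nil => intro st; rfl
  | cons v vs ih => intro st; simp [List.flatMap_cons, ih, List.foldl]

lemma sorted_ofList_eq_fold (L : List Int) :
    PySem.List.sorted (PySem.Set.ofList L) (fun c => c) = L.foldl insSorted [] := by
  apply PySem.List.sorted_eq_of_perm_of_pairwise_lt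
  · refine (List.perm_ext_iff_of_nodup ?_ (PySem.Set.nodup_ofList _)).mpr ?_
    · exact (fold_pairwise_insSorted L [] List.Pairwise.nil).imp (fun h => ne_of_lt h)
    · intro a
      rw [fold_mem_insSorted, PySem.Set.mem_ofList]
      simp
  · exact (fold_pairwise_insSorted L [] List.Pairwise.nil).imp (fun h => h)

-- ===== VERDICT (by name: the statement is the Claim_ definition above) =====
theorem coord_range_spec : Claim_equal_coord_range := by
  intro volumes key1 key2 _ _
  unfold Spec_coord_range coord_range coord_range_alt
  rw [pvCoordSet_eq, pvA_chain, sorted_ofList_eq_fold, pvAltFold]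
  exact (fold_insert_chain _ [] List.Pairwise.nil).symm
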